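-- pv_equiv track=rewrite | github.com/AwakeningOS/epos | epos.py | _has_open_tool_tag
-- ===== SOURCE A (Python) =====
-- def _has_open_tool_tag(text):
--     """Check for unclosed tool call tags (all formats)."""
--     opens = ['<tool_call>', '<function_calls>', '<function=']
--     closes = ['</tool_call>', '</talk>', '</tool>', '</function_calls>', '</function>']
--     last_open = -1
--     for tag in opens:
--         pos = text.rfind(tag)
--         if pos > last_open:
--             last_open = pos
--     if last_open == -1:
--         tc_open = text.rfind('```tool_call')
--         if tc_open == -1:
--             return False
--         after_tc = text[tc_open + len('```tool_call'):]
--         return '```' not in after_tc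
--     after = text[last_open:]
--     has_close_after = any(tag in after for tag in closes)
--     return not has_close_after
-- ===== SOURCE B (Python) =====
-- def _has_open_tool_tag(text):
--     """Check for unclosed tool call tags (all formats)."""
--     opens = ['<tool_call>', '<function_calls>', '<function=']
--     closes = ['</tool_call>', '</talk>', '</tool>', '</function_calls>', '</function>']
--     seen_open = False      # some open tag occurs somewhere
--     pending = False        # the rightmost open tag seen so far has no close tag after it
--     fence_end = None       # end index of the rightmost ```tool_call fence seen so far
--     fence_closed = False   # that fence is followed by a ``` at or past its end
--     for i in range(len(text)):
--         if any(text.startswith(t, i) for t in opens):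
--             seen_open = True
--             pending = True
--         elif any(text.startswith(t, i) for t in closes):
--             pending = False
--         if text.startswith('```tool_call', i):
--             fence_end = i + 12
--             fence_closed = False
--         elif fence_end is not None and i >= fence_end and text.startswith('```', i):
--             fence_closed = True
--     if seen_open:
--         return pending
--     if fence_end is None:
--         return False
--     return not fence_closed
-- ===== Notes on version B (the rewrite author's own statement) =====
-- stated objective: alternative
-- what changed: B replaces A's rfind-over-tag-sets and suffix-slice membership tests by one forward left-to-right scan over the character positions, maintaining a four-field state machine (open seen, open pending, current fence end, fence closed) and reading the answer off the final state.
import Mathlib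
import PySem

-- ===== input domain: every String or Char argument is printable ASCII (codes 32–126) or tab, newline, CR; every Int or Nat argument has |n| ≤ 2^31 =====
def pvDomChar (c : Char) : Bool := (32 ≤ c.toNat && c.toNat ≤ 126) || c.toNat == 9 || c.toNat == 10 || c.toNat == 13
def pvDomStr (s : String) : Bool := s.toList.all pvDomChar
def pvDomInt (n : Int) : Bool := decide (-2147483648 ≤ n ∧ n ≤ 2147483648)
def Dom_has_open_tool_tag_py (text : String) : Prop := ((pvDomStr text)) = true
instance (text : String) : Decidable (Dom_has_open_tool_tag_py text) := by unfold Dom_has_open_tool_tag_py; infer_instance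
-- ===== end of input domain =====

-- B detects unclosed tags by a single forward scan over the character positions with a small state
-- machine, instead of A's rfind-over-tag-sets plus suffix-slice membership (objective: alternative, same cost).

-- ===== PORT A =====
def has_open_tool_tag_py (text : String) : Bool :=
  let opens := ["<tool_call>", "<function_calls>", "<function="]
  let closes := ["</tool_call>", "</talk>", "</tool>", "</function_calls>", "</function>"]
  let last_open := opens.foldl (fun lastOpen tag =>
      let pos := PySem.Str.rfind text tag
      if pos > lastOpen then pos else lastOpen) (-1)
  if last_open == -1 then
    let tc_open := PySem.Str.rfind text "```tool_call"
    if tc_open == -1 then false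
    else
      -- len('```tool_call') = 12
      let after_tc := PySem.Str.slice text (some (tc_open + 12)) none
      ! PySem.Str.isIn "```" after_tc
  else
    let after := PySem.Str.slice text (some last_open) none
    let has_close_after := closes.any (fun tag => PySem.Str.isIn tag after)
    ! has_close_after

-- ===== PORT B =====
-- scan state: (seen_open, pending, fence_end, fence_closed), exactly Source B's four loop variables
structure PvScanSt where
  seen : Bool
  pending : Bool
  fenceEnd : Option Int
  fenceClosed : Bool
  deriving DecidableEq, Repr

-- text.startswith(t, i) with 0 ≤ i ≤ len(text) is exactly `t is a prefix of text[i:]`: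
-- ported as PySem.Chars.startswith (cs.drop i) t.toList (exact on that domain; i ∈ range(len) here).
def pvStartsAt (cs : List Char) (t : String) (i : Nat) : Bool :=
  PySem.Chars.startswith (cs.drop i) t.toList

def pvScanStep (cs : List Char) (s : PvScanSt) (i : Nat) : PvScanSt :=
  let opens := ["<tool_call>", "<function_calls>", "<function="]
  let closes := ["</tool_call>", "</talk>", "</tool>", "</function_calls>", "</function>"]
  let s1 :=
    if opens.any (fun t => pvStartsAt cs t i) then { s with seen := true, pending := true }
    else if closes.any (fun t => pvStartsAt cs t i) then { s with pending := false }
    else s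
  if pvStartsAt cs "```tool_call" i then { s1 with fenceEnd := some ((i : Int) + 12), fenceClosed := false }
  else if (match s1.fenceEnd with | some e => decide (e ≤ (i : Int)) | none => false)
          && pvStartsAt cs "```" i then { s1 with fenceClosed := true }
  else s1

def has_open_tool_tag_py_alt (text : String) : Bool :=
  let cs := text.toList
  let st := (List.range cs.length).foldl (pvScanStep cs) ⟨false, false, none, false⟩
  if st.seen then st.pending
  else match st.fenceEnd with
    | none => false
    | some _ => ! st.fenceClosed

-- ===== PRECONDITION & SPEC =====
def Spec_has_open_tool_tag_py (text : String) (out : Bool) : Prop := out = has_open_tool_tag_py_alt text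
instance (text : String) (out : Bool) : Decidable (Spec_has_open_tool_tag_py text out) := by unfold Spec_has_open_tool_tag_py; infer_instance

-- ===== CLAIM (what is proved, stated in full; the proofs are below) =====
def Claim_equal_has_open_tool_tag_py : Prop := ∀ (text : String), Dom_has_open_tool_tag_py text → Spec_has_open_tool_tag_py text (has_open_tool_tag_py text)

-- ===== LEMMAS AND PROOFS =====

-- rightmost index i < k with p i, as Python's -1 convention
def pvMaxIdx (p : Nat → Bool) (k : Nat) : Int :=
  (List.range k).foldl (fun m i => if p i then max m (i : Int) else m) (-1)

def pvOpenAt (cs : List Char) (i : Nat) : Bool :=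
  (["<tool_call>", "<function_calls>", "<function="] : List String).any (fun t => pvStartsAt cs t i)
def pvCloseAt (cs : List Char) (i : Nat) : Bool :=
  (["</tool_call>", "</talk>", "</tool>", "</function_calls>", "</function>"] : List String).any (fun t => pvStartsAt cs t i)
def pvFenceAt (cs : List Char) (i : Nat) : Bool := pvStartsAt cs "```tool_call" i
def pvBtAt (cs : List Char) (i : Nat) : Bool := pvStartsAt cs "```" i

lemma pvMaxIdx_neg_one_le (p : Nat → Bool) (k : Nat) : -1 ≤ pvMaxIdx p k := by
  induction k with
  | zero => simp [pvMaxIdx]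
  | succ k ih =>
    unfold pvMaxIdx at *
    rw [List.range_succ, List.foldl_append]
    simp only [List.foldl_cons, List.foldl_nil]
    split
    · exact le_trans ih (le_max_left _ _)
    · exact ih

lemma pvMaxIdx_lt (p : Nat → Bool) (k : Nat) : pvMaxIdx p k < (k : Int) := by
  induction k with
  | zero => simp [pvMaxIdx]
  | succ k ih =>
    unfold pvMaxIdx at *
    rw [List.range_succ, List.foldl_append]
    simp only [List.foldl_cons, List.foldl_nil]
    split
    · exact max_lt (by omega) (by push_cast; omega)
    · omega

lemma pvMaxIdx_succ (p : Nat → Bool) (k : Nat) :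
    pvMaxIdx p (k + 1) = if p k then (k : Int) else pvMaxIdx p k := by
  have h := pvMaxIdx_lt p k
  unfold pvMaxIdx
  rw [List.range_succ, List.foldl_append]
  simp only [List.foldl_cons, List.foldl_nil]
  split
  · exact max_eq_right (le_of_lt h)
  · rfl

lemma pvMaxIdx_ge_iff (p : Nat → Bool) (k j : Nat) :
    ((j : Int) ≤ pvMaxIdx p k) ↔ ∃ i, j ≤ i ∧ i < k ∧ p i = true := by
  induction k with
  | zero => simp [pvMaxIdx]; omega
  | succ k ih =>
    rw [pvMaxIdx_succ]
    split
    · rename_i hp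
      constructor
      · intro hj
        exact ⟨k, by exact_mod_cast hj, by omega, hp⟩
      · rintro ⟨i, hji, hik, hpi⟩
        exact_mod_cast (by omega : (j : Int) ≤ (k : Int))
    · rename_i hp
      rw [ih]
      constructor
      · rintro ⟨i, h1, h2, h3⟩; exact ⟨i, h1, by omega, h3⟩
      · rintro ⟨i, h1, h2, h3⟩
        refine ⟨i, h1, ?_, h3⟩
        rcases Nat.lt_or_ge i k with h | h
        · exact h
        · have : i = k := by omega
          subst this; simp [h3] at hp

lemma pvInt_eq_of_thresholds (a b : Int) (ha : -1 ≤ a) (hb : -1 ≤ b)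
    (h : ∀ j : Nat, ((j : Int) ≤ a ↔ (j : Int) ≤ b)) : a = b := by
  by_cases ha0 : 0 ≤ a
  · have h1 := (h a.toNat).mp (by omega)
    have h2 := (h b.toNat).mpr (by omega)
    omega
  · push Not at ha0
    have : a = -1 := by omega
    subst this
    by_contra hne
    have hb0 : 0 ≤ b := by omega
    have := (h b.toNat).mpr (by omega)
    omega


-- rfind groundwork (no PySem lemma characterises rfind's value; these are specific to its .go loop)
lemma pv_neg_one_le_go (s c : List Char) (n : Nat) : -1 ≤ PySem.Chars.rfind.go s c n := by
  induction n with
  | zero => simp only [PySem.Chars.rfind.go]; split <;> omega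
  | succ n ih =>
    simp only [PySem.Chars.rfind.go]
    split
    · push_cast; omega
    · exact ih

lemma pv_neg_one_le_rfind (s c : List Char) : -1 ≤ PySem.Chars.rfind s c := by
  unfold PySem.Chars.rfind; exact pv_neg_one_le_go s c s.length

lemma pv_go_ge_iff (s c : List Char) (n k : Nat) :
    ((k : Int) ≤ PySem.Chars.rfind.go s c n) ↔
      ∃ j : Nat, k ≤ j ∧ j ≤ n ∧ c.isPrefixOf (s.drop j) = true := by
  induction n with
  | zero =>
    simp only [PySem.Chars.rfind.go]
    split
    · rename_i h
      constructor
      · intro hk; exact ⟨0, by omega, le_refl _, by simpa using h⟩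
      · rintro ⟨j, hkj, hj0, _⟩; omega
    · rename_i h
      constructor
      · intro hk; omega
      · rintro ⟨j, hkj, hj0, hp⟩
        interval_cases j
        exact absurd (by simpa using hp) h
  | succ n ih =>
    simp only [PySem.Chars.rfind.go]
    split
    · rename_i h
      constructor
      · intro hk; exact ⟨n + 1, by omega, le_refl _, h⟩
      · rintro ⟨j, hkj, hj, _⟩; push_cast; omega
    · rename_i h
      rw [ih]
      constructor
      · rintro ⟨j, hkj, hj, hp⟩; exact ⟨j, hkj, by omega, hp⟩
      · rintro ⟨j, hkj, hj, hp⟩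
        refine ⟨j, hkj, ?_, hp⟩
        rcases Nat.lt_or_ge j (n + 1) with h' | h'
        · omega
        · have : j = n + 1 := by omega
          subst this; exact absurd hp h

lemma pvStartsAt_iff (cs : List Char) (t : String) (i : Nat) :
    pvStartsAt cs t i = true ↔ t.toList <+: cs.drop i := by
  simp [pvStartsAt, PySem.Chars.startswith_iff]

lemma pv_rfind_ge_iff (s : List Char) (c : String) (hc : c.toList ≠ []) (k : Nat) :
    ((k : Int) ≤ PySem.Chars.rfind s c.toList) ↔
      ∃ j, k ≤ j ∧ j < s.length ∧ pvStartsAt s c j = true := by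
  unfold PySem.Chars.rfind
  rw [pv_go_ge_iff]
  constructor
  · rintro ⟨j, hkj, hj, hp⟩
    rw [List.isPrefixOf_iff_prefix] at hp
    refine ⟨j, hkj, ?_, (pvStartsAt_iff s c j).mpr hp⟩
    by_contra hlen
    have hnil : s.drop j = [] := List.drop_eq_nil_iff.mpr (by omega)
    rw [hnil, List.prefix_nil] at hp
    exact hc hp
  · rintro ⟨j, hkj, hj, hp⟩
    exact ⟨j, hkj, by omega,
      List.isPrefixOf_iff_prefix.mpr ((pvStartsAt_iff s c j).mp hp)⟩

lemma pv_isIn_drop_iff (s : List Char) (c : String) (hc : c.toList ≠ []) (k : Nat) :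
    PySem.Chars.isIn c.toList (s.drop k) = true ↔
      ∃ j, k ≤ j ∧ j < s.length ∧ pvStartsAt s c j = true := by
  rw [← PySem.Chars.exists_prefix_drop_iff_isIn]
  constructor
  · rintro ⟨j, hp⟩
    rw [List.drop_drop] at hp
    refine ⟨k + j, by omega, ?_, (pvStartsAt_iff s c _).mpr hp⟩
    by_contra hlen
    have hnil : s.drop (k + j) = [] := List.drop_eq_nil_iff.mpr (by omega)
    rw [hnil, List.prefix_nil] at hp
    exact hc hp
  · rintro ⟨j, hkj, hj, hp⟩
    refine ⟨j - k, ?_⟩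
    rw [List.drop_drop]
    have hjk : k + (j - k) = j := by omega
    rw [hjk]
    exact (pvStartsAt_iff s c j).mp hp

lemma pv_le_foldl_max_iff (l : List Int) (init k : Int) :
    k ≤ l.foldl max init ↔ k ≤ init ∨ ∃ x ∈ l, k ≤ x := by
  induction l generalizing init with
  | nil => simp
  | cons a l ih =>
    simp only [List.foldl_cons, ih, List.mem_cons]
    constructor
    · rintro (h | ⟨x, hx, hkx⟩)
      · rcases le_max_iff.mp h with h | h
        · exact Or.inl h
        · exact Or.inr ⟨a, Or.inl rfl, h⟩
      · exact Or.inr ⟨x, Or.inr hx, hkx⟩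
    · rintro (h | ⟨x, hx | hx, hkx⟩)
      · exact Or.inl (le_max_of_le_left h)
      · subst hx; exact Or.inl (le_max_of_le_right hkx)
      · exact Or.inr ⟨x, hx, hkx⟩

lemma pv_fold_if_eq_fold_max (tags : List String) (text : String) (init : Int) :
    tags.foldl (fun lastOpen tag =>
      let pos := PySem.Str.rfind text tag
      if pos > lastOpen then pos else lastOpen) init
    = (tags.map (fun tag => PySem.Str.rfind text tag)).foldl max init := by
  induction tags generalizing init with
  | nil => rfl
  | cons a l ih =>
    simp only [List.foldl_cons, List.map_cons, ih]
    congr 1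
    simp only [Int.max_def]
    split_ifs <;> omega

-- A's fold-with-max over rfind values equals the rightmost index where any of the tags matches
lemma pv_foldmax_rfind_eq (text : String) (tags : List String) (h : ∀ t ∈ tags, t.toList ≠ []) :
    (tags.map (fun t => PySem.Str.rfind text t)).foldl max (-1)
      = pvMaxIdx (fun i => tags.any (fun t => pvStartsAt text.toList t i)) text.toList.length := by
  apply pvInt_eq_of_thresholds _ _ ((PySem.List.le_foldl_max _ _).1) (pvMaxIdx_neg_one_le _ _)
  intro j
  rw [pv_le_foldl_max_iff, pvMaxIdx_ge_iff]
  constructor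
  · rintro (h0 | ⟨x, hx, hjx⟩)
    · omega
    · obtain ⟨t, ht, rfl⟩ := List.mem_map.mp hx
      rw [PySem.Str.rfind_eq] at hjx
      obtain ⟨i, hji, hin, hp⟩ := (pv_rfind_ge_iff text.toList t (h t ht) j).mp hjx
      exact ⟨i, hji, hin, List.any_eq_true.mpr ⟨t, ht, hp⟩⟩
  · rintro ⟨i, hji, hin, hany⟩
    obtain ⟨t, ht, hst⟩ := List.any_eq_true.mp hany
    refine Or.inr ⟨PySem.Str.rfind text t, List.mem_map.mpr ⟨t, ht, rfl⟩, ?_⟩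
    rw [PySem.Str.rfind_eq]
    exact (pv_rfind_ge_iff text.toList t (h t ht) j).mpr ⟨i, hji, hin, hst⟩

lemma pv_any_isIn_drop (text : String) (tags : List String) (h : ∀ t ∈ tags, t.toList ≠ []) (k : Nat) :
    tags.any (fun t => PySem.Chars.isIn t.toList (text.toList.drop k)) = true ↔
      ((k : Int) ≤ pvMaxIdx (fun i => tags.any (fun t => pvStartsAt text.toList t i)) text.toList.length) := by
  rw [pvMaxIdx_ge_iff, List.any_eq_true]
  constructor
  · rintro ⟨t, ht, hin⟩
    obtain ⟨i, hki, hin', hp⟩ := (pv_isIn_drop_iff text.toList t (h t ht) k).mp hin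
    exact ⟨i, hki, hin', List.any_eq_true.mpr ⟨t, ht, hp⟩⟩
  · rintro ⟨i, hki, hin, hany⟩
    obtain ⟨t, ht, hst⟩ := List.any_eq_true.mp hany
    exact ⟨t, ht, (pv_isIn_drop_iff text.toList t (h t ht) k).mpr ⟨i, hki, hin, hst⟩⟩

-- open tags have a non-'/' second character, close tags a '/' one: never both at the same index
lemma pv_prefix_get1 (t d : List Char) (h : t <+: d) (h1 : 1 < t.length) : d[1]? = t[1]? := by
  obtain ⟨r, rfl⟩ := h
  rw [List.getElem?_append_left h1]

lemma pv_open_not_close (cs : List Char) (i : Nat) (h : pvOpenAt cs i = true) :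
    pvCloseAt cs i = false := by
  rw [pvOpenAt, List.any_eq_true] at h
  obtain ⟨t, ht, hst⟩ := h
  rw [pvStartsAt_iff] at hst
  by_contra hc
  rw [Bool.not_eq_false, pvCloseAt, List.any_eq_true] at hc
  obtain ⟨u, hu, hsu⟩ := hc
  rw [pvStartsAt_iff] at hsu
  have e1 := pv_prefix_get1 _ _ hst (by fin_cases ht <;> decide)
  have e2 := pv_prefix_get1 _ _ hsu (by fin_cases hu <;> decide)
  have h12 : (t.toList)[1]? = (u.toList)[1]? := by rw [← e1, ← e2]
  fin_cases ht <;> fin_cases hu <;> revert h12 <;> decide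

lemma pvScanStep_def (cs : List Char) (s : PvScanSt) (i : Nat) :
    pvScanStep cs s i =
      (let s1 := if pvOpenAt cs i then { s with seen := true, pending := true }
                 else if pvCloseAt cs i then { s with pending := false } else s;
       if pvFenceAt cs i then { s1 with fenceEnd := some ((i : Int) + 12), fenceClosed := false }
       else if (match s1.fenceEnd with | some e => decide (e ≤ (i : Int)) | none => false)
               && pvBtAt cs i then { s1 with fenceClosed := true } else s1) := rfl


lemma pvSt_ext {a b : PvScanSt} (h1 : a.seen = b.seen) (h2 : a.pending = b.pending)
    (h3 : a.fenceEnd = b.fenceEnd) (h4 : a.fenceClosed = b.fenceClosed) : a = b := by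
  cases a; cases b; simp_all

lemma pv_step (cs : List Char) (k : Nat)
    (hG : ¬((decide (pvMaxIdx (pvFenceAt cs) k + 12 ≤ (k : Int)) && pvBtAt cs k) = true)) :
    decide (0 ≤ pvMaxIdx (pvFenceAt cs) k ∧
        ∃ j < k, pvMaxIdx (pvFenceAt cs) k + 12 ≤ (j : Int) ∧ pvBtAt cs j = true)
      = decide (0 ≤ pvMaxIdx (pvFenceAt cs) k ∧
        ∃ j < k + 1, pvMaxIdx (pvFenceAt cs) k + 12 ≤ (j : Int) ∧ pvBtAt cs j = true) := by
  rw [decide_eq_decide]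
  constructor
  · rintro ⟨h0, j, hj, h1, h2⟩
    exact ⟨h0, j, by omega, h1, h2⟩
  · rintro ⟨h0, j, hj, h1, h2⟩
    refine ⟨h0, j, ?_, h1, h2⟩
    rcases Nat.lt_or_ge j k with h' | h'
    · exact h'
    · exfalso
      have hjk : j = k := by omega
      subst hjk
      simp only [Bool.and_eq_true, decide_eq_true_eq, not_and] at hG
      exact hG h1 h2

lemma pv_hit (cs : List Char) (k : Nat)
    (hMFle : -1 ≤ pvMaxIdx (pvFenceAt cs) k) (hMF : ¬(pvMaxIdx (pvFenceAt cs) k = -1))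
    (hG : (decide (pvMaxIdx (pvFenceAt cs) k + 12 ≤ (k : Int)) && pvBtAt cs k) = true) :
    0 ≤ pvMaxIdx (pvFenceAt cs) k ∧
      ∃ j < k + 1, pvMaxIdx (pvFenceAt cs) k + 12 ≤ (j : Int) ∧ pvBtAt cs j = true := by
  simp only [Bool.and_eq_true, decide_eq_true_eq] at hG
  exact ⟨by omega, k, by omega, hG.1, hG.2⟩

-- the scan invariant: after processing positions [0, k), the four state fields are determined
-- by the rightmost open / close / fence positions below k
lemma pvScan_inv (cs : List Char) (k : Nat) :
    (List.range k).foldl (pvScanStep cs) ⟨false, false, none, false⟩ =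
      { seen := decide (0 ≤ pvMaxIdx (pvOpenAt cs) k),
        pending := decide (pvMaxIdx (pvCloseAt cs) k < pvMaxIdx (pvOpenAt cs) k),
        fenceEnd := if pvMaxIdx (pvFenceAt cs) k = -1 then none
                    else some (pvMaxIdx (pvFenceAt cs) k + 12),
        fenceClosed := decide (0 ≤ pvMaxIdx (pvFenceAt cs) k ∧
          ∃ j, j < k ∧ pvMaxIdx (pvFenceAt cs) k + 12 ≤ (j : Int) ∧ pvBtAt cs j = true) } := by
  induction k with
  | zero => simp [pvMaxIdx]
  | succ k ih =>
    have hMOlt := pvMaxIdx_lt (pvOpenAt cs) k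
    have hMClt := pvMaxIdx_lt (pvCloseAt cs) k
    have hMFlt := pvMaxIdx_lt (pvFenceAt cs) k
    have hMOle := pvMaxIdx_neg_one_le (pvOpenAt cs) k
    have hMCle := pvMaxIdx_neg_one_le (pvCloseAt cs) k
    have hMFle := pvMaxIdx_neg_one_le (pvFenceAt cs) k
    rw [List.range_succ, List.foldl_append, List.foldl_cons, List.foldl_nil, ih,
      pvScanStep_def, pvMaxIdx_succ, pvMaxIdx_succ, pvMaxIdx_succ]
    by_cases hF : pvFenceAt cs k = true
    · -- a new fence at k resets the fence fields; the elif shadows the backticks it starts with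
      by_cases hO : pvOpenAt cs k = true
      · have hC := pv_open_not_close cs k hO
        refine pvSt_ext ?_ ?_ ?_ ?_ <;>
          simp only [hO, hC, hF, Bool.false_eq_true, Bool.false_and, reduceIte] <;>
          first
            | rfl
            | (rw [eq_comm, decide_eq_true_eq]; omega)
            | (rw [eq_comm, decide_eq_false_iff_not]; omega)
            | (rw [if_neg (by omega : ¬((k : Int) = -1))])
            | (rw [eq_comm, decide_eq_false_iff_not]; rintro ⟨-, j, hj, hle, -⟩; omega)
            | (norm_num; done)
            | (exact pv_hit cs k hMFle hMF hG)
            | (rw [eq_comm, decide_eq_true_eq]; exact pv_hit cs k hMFle hMF hG)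
            | (rw [decide_eq_true_eq]; exact pv_hit cs k hMFle hMF hG)
            | (exact pv_step cs k hG)
      · by_cases hC : pvCloseAt cs k = true
        · refine pvSt_ext ?_ ?_ ?_ ?_ <;>
            simp only [hO, hC, hF, Bool.false_eq_true, Bool.false_and, reduceIte] <;>
            first
              | rfl
              | (rw [eq_comm, decide_eq_true_eq]; omega)
              | (rw [eq_comm, decide_eq_false_iff_not]; omega)
              | (rw [if_neg (by omega : ¬((k : Int) = -1))])
              | (rw [eq_comm, decide_eq_false_iff_not]; rintro ⟨-, j, hj, hle, -⟩; omega)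
              | (norm_num; done)
              | (exact pv_hit cs k hMFle hMF hG)
              | (rw [eq_comm, decide_eq_true_eq]; exact pv_hit cs k hMFle hMF hG)
              | (rw [decide_eq_true_eq]; exact pv_hit cs k hMFle hMF hG)
              | (exact pv_step cs k hG)
        · refine pvSt_ext ?_ ?_ ?_ ?_ <;>
            simp only [hO, hC, hF, Bool.false_eq_true, Bool.false_and, reduceIte] <;>
            first
              | rfl
              | (rw [eq_comm, decide_eq_true_eq]; omega)
              | (rw [eq_comm, decide_eq_false_iff_not]; omega)
              | (rw [if_neg (by omega : ¬((k : Int) = -1))])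
              | (rw [eq_comm, decide_eq_false_iff_not]; rintro ⟨-, j, hj, hle, -⟩; omega)
              | (norm_num; done)
              | (exact pv_hit cs k hMFle hMF hG)
              | (rw [eq_comm, decide_eq_true_eq]; exact pv_hit cs k hMFle hMF hG)
              | (rw [decide_eq_true_eq]; exact pv_hit cs k hMFle hMF hG)
              | (exact pv_step cs k hG)
    · by_cases hMF : pvMaxIdx (pvFenceAt cs) k = -1
      · -- no fence yet: the guard is false, the fence fields stay (none, false)
        by_cases hO : pvOpenAt cs k = true
        · have hC := pv_open_not_close cs k hO
          refine pvSt_ext ?_ ?_ ?_ ?_ <;>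
            simp only [hO, hC, hF, hMF, Bool.false_eq_true, Bool.false_and, reduceIte] <;>
            first
              | rfl
              | (rw [eq_comm, decide_eq_true_eq]; omega)
              | (rw [eq_comm, decide_eq_false_iff_not]; omega)
              | (rw [if_neg (by omega : ¬((k : Int) = -1))])
              | (rw [eq_comm, decide_eq_false_iff_not]; rintro ⟨-, j, hj, hle, -⟩; omega)
              | (norm_num; done)
              | (exact pv_hit cs k hMFle hMF hG)
              | (rw [eq_comm, decide_eq_true_eq]; exact pv_hit cs k hMFle hMF hG)
              | (rw [decide_eq_true_eq]; exact pv_hit cs k hMFle hMF hG)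
              | (exact pv_step cs k hG)
        · by_cases hC : pvCloseAt cs k = true
          · refine pvSt_ext ?_ ?_ ?_ ?_ <;>
              simp only [hO, hC, hF, hMF, Bool.false_eq_true, Bool.false_and, reduceIte] <;>
              first
                | rfl
                | (rw [eq_comm, decide_eq_true_eq]; omega)
                | (rw [eq_comm, decide_eq_false_iff_not]; omega)
                | (rw [if_neg (by omega : ¬((k : Int) = -1))])
                | (rw [eq_comm, decide_eq_false_iff_not]; rintro ⟨-, j, hj, hle, -⟩; omega)
                | (norm_num; done)
                | (rw [eq_comm, decide_eq_true_eq]; exact pv_hit cs k hMFle hMF hG)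
                | (rw [decide_eq_true_eq]; exact pv_hit cs k hMFle hMF hG)
                | (exact pv_step cs k hG)
          · refine pvSt_ext ?_ ?_ ?_ ?_ <;>
              simp only [hO, hC, hF, hMF, Bool.false_eq_true, Bool.false_and, reduceIte] <;>
              first
                | rfl
                | (rw [eq_comm, decide_eq_true_eq]; omega)
                | (rw [eq_comm, decide_eq_false_iff_not]; omega)
                | (rw [if_neg (by omega : ¬((k : Int) = -1))])
                | (rw [eq_comm, decide_eq_false_iff_not]; rintro ⟨-, j, hj, hle, -⟩; omega)
                | (norm_num; done)
                | (rw [eq_comm, decide_eq_true_eq]; exact pv_hit cs k hMFle hMF hG)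
                | (rw [decide_eq_true_eq]; exact pv_hit cs k hMFle hMF hG)
                | (exact pv_step cs k hG)
      · by_cases hG : (decide (pvMaxIdx (pvFenceAt cs) k + 12 ≤ (k : Int)) && pvBtAt cs k) = true
        · -- backticks at or past the current fence end close it
          by_cases hO : pvOpenAt cs k = true
          · have hC := pv_open_not_close cs k hO
            refine pvSt_ext ?_ ?_ ?_ ?_ <;>
              simp only [hO, hC, hF, hMF, hG, Bool.false_eq_true, Bool.false_and, reduceIte] <;>
              first
                | rfl
                | (rw [eq_comm, decide_eq_true_eq]; omega)
                | (rw [eq_comm, decide_eq_false_iff_not]; omega)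
                | (rw [if_neg (by omega : ¬((k : Int) = -1))])
                | (rw [eq_comm, decide_eq_false_iff_not]; rintro ⟨-, j, hj, hle, -⟩; omega)
                | (norm_num; done)
                | (rw [eq_comm, decide_eq_true_eq]; exact pv_hit cs k hMFle hMF hG)
                | (rw [decide_eq_true_eq]; exact pv_hit cs k hMFle hMF hG)
                | (exact pv_step cs k hG)
          · by_cases hC : pvCloseAt cs k = true
            · refine pvSt_ext ?_ ?_ ?_ ?_ <;>
                simp only [hO, hC, hF, hMF, hG, Bool.false_eq_true, Bool.false_and, reduceIte] <;>
                first
                  | rfl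
                  | (rw [eq_comm, decide_eq_true_eq]; omega)
                  | (rw [eq_comm, decide_eq_false_iff_not]; omega)
                  | (rw [if_neg (by omega : ¬((k : Int) = -1))])
                  | (rw [eq_comm, decide_eq_false_iff_not]; rintro ⟨-, j, hj, hle, -⟩; omega)
                  | (norm_num; done)
                  | (rw [eq_comm, decide_eq_true_eq]; exact pv_hit cs k hMFle hMF hG)
                  | (rw [decide_eq_true_eq]; exact pv_hit cs k hMFle hMF hG)
                  | (exact pv_step cs k hG)
            · refine pvSt_ext ?_ ?_ ?_ ?_ <;>
                simp only [hO, hC, hF, hMF, hG, Bool.false_eq_true, Bool.false_and, reduceIte] <;>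
                first
                  | rfl
                  | (rw [eq_comm, decide_eq_true_eq]; omega)
                  | (rw [eq_comm, decide_eq_false_iff_not]; omega)
                  | (rw [if_neg (by omega : ¬((k : Int) = -1))])
                  | (rw [eq_comm, decide_eq_false_iff_not]; rintro ⟨-, j, hj, hle, -⟩; omega)
                  | (norm_num; done)
                  | (rw [eq_comm, decide_eq_true_eq]; exact pv_hit cs k hMFle hMF hG)
                  | (rw [decide_eq_true_eq]; exact pv_hit cs k hMFle hMF hG)
                  | (exact pv_step cs k hG)
        · -- nothing at position k affects the fence fields
          by_cases hO : pvOpenAt cs k = true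
          · have hC := pv_open_not_close cs k hO
            refine pvSt_ext ?_ ?_ ?_ ?_ <;>
              simp only [hO, hC, hF, hMF, hG, Bool.false_eq_true, Bool.false_and, reduceIte] <;>
              first
                | rfl
                | (rw [eq_comm, decide_eq_true_eq]; omega)
                | (rw [eq_comm, decide_eq_false_iff_not]; omega)
                | (rw [if_neg (by omega : ¬((k : Int) = -1))])
                | (rw [eq_comm, decide_eq_false_iff_not]; rintro ⟨-, j, hj, hle, -⟩; omega)
                | (norm_num; done)
                | (rw [eq_comm, decide_eq_true_eq]; exact pv_hit cs k hMFle hMF hG)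
                | (rw [decide_eq_true_eq]; exact pv_hit cs k hMFle hMF hG)
                | (exact pv_step cs k hG)
          · by_cases hC : pvCloseAt cs k = true
            · refine pvSt_ext ?_ ?_ ?_ ?_ <;>
                simp only [hO, hC, hF, hMF, hG, Bool.false_eq_true, Bool.false_and, reduceIte] <;>
                first
                  | rfl
                  | (rw [eq_comm, decide_eq_true_eq]; omega)
                  | (rw [eq_comm, decide_eq_false_iff_not]; omega)
                  | (rw [if_neg (by omega : ¬((k : Int) = -1))])
                  | (rw [eq_comm, decide_eq_false_iff_not]; rintro ⟨-, j, hj, hle, -⟩; omega)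
                  | (norm_num; done)
                  | (rw [eq_comm, decide_eq_true_eq]; exact pv_hit cs k hMFle hMF hG)
                  | (rw [decide_eq_true_eq]; exact pv_hit cs k hMFle hMF hG)
                  | (exact pv_step cs k hG)
            · refine pvSt_ext ?_ ?_ ?_ ?_ <;>
                simp only [hO, hC, hF, hMF, hG, Bool.false_eq_true, Bool.false_and, reduceIte] <;>
                first
                  | rfl
                  | (rw [eq_comm, decide_eq_true_eq]; omega)
                  | (rw [eq_comm, decide_eq_false_iff_not]; omega)
                  | (rw [if_neg (by omega : ¬((k : Int) = -1))])
                  | (rw [eq_comm, decide_eq_false_iff_not]; rintro ⟨-, j, hj, hle, -⟩; omega)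
                  | (norm_num; done)
                  | (rw [eq_comm, decide_eq_true_eq]; exact pv_hit cs k hMFle hMF hG)
                  | (rw [decide_eq_true_eq]; exact pv_hit cs k hMFle hMF hG)
                  | (exact pv_step cs k hG)

-- ===== VERDICT (by name: the statement is the Claim_ definition above) =====
lemma pv_rfind_fence_eq (text : String) :
    PySem.Str.rfind text "```tool_call"
      = pvMaxIdx (pvFenceAt text.toList) text.toList.length := by
  apply pvInt_eq_of_thresholds _ _
    (by rw [PySem.Str.rfind_eq]; exact pv_neg_one_le_rfind _ _) (pvMaxIdx_neg_one_le _ _)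
  intro j
  rw [PySem.Str.rfind_eq, pv_rfind_ge_iff _ _ (by decide) j, pvMaxIdx_ge_iff]
  exact Iff.rfl

theorem has_open_tool_tag_py_spec : Claim_equal_has_open_tool_tag_py := by
  intro text _
  unfold Spec_has_open_tool_tag_py
  show has_open_tool_tag_py text = has_open_tool_tag_py_alt text
  simp only [has_open_tool_tag_py, has_open_tool_tag_py_alt]
  rw [pv_fold_if_eq_fold_max, pvScan_inv]
  have hLO : (List.map (fun tag => PySem.Str.rfind text tag)
        ["<tool_call>", "<function_calls>", "<function="]).foldl max (-1)
      = pvMaxIdx (pvOpenAt text.toList) text.toList.length :=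
    pv_foldmax_rfind_eq text _ (by decide)
  rw [hLO]
  have hMOle := pvMaxIdx_neg_one_le (pvOpenAt text.toList) text.toList.length
  by_cases h0 : 0 ≤ pvMaxIdx (pvOpenAt text.toList) text.toList.length
  · -- some open tag occurs: both sides compare the last close position with the last open
    have hne : (pvMaxIdx (pvOpenAt text.toList) text.toList.length == -1) = false := by
      simp only [beq_eq_false_iff_ne, ne_eq]; omega
    have hseen : decide (0 ≤ pvMaxIdx (pvOpenAt text.toList) text.toList.length) = true :=
      decide_eq_true h0
    rw [hne, hseen]
    simp only [Bool.false_eq_true, if_false, if_true]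
    have htl : (PySem.Str.slice text
          (some (pvMaxIdx (pvOpenAt text.toList) text.toList.length)) none).toList
        = text.toList.drop (pvMaxIdx (pvOpenAt text.toList) text.toList.length).toNat := by
      rw [PySem.Str.toList_slice, PySem.Chars.slice_eq_listSlice, PySem.List.slice_from _ h0]
    have hany : ((["</tool_call>", "</talk>", "</tool>", "</function_calls>", "</function>"]
            : List String).any (fun t => PySem.Chars.isIn t.toList
              (text.toList.drop (pvMaxIdx (pvOpenAt text.toList) text.toList.length).toNat))
          = true)
        ↔ (((pvMaxIdx (pvOpenAt text.toList) text.toList.length).toNat : Int)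
            ≤ pvMaxIdx (pvCloseAt text.toList) text.toList.length) :=
      pv_any_isIn_drop text _ (by decide) _
    rw [Int.toNat_of_nonneg h0] at hany
    rw [Bool.eq_iff_iff]
    simp only [Bool.not_eq_true', List.any_eq_false, decide_eq_true_eq]
    constructor
    · intro hall
      have : ¬ ((["</tool_call>", "</talk>", "</tool>", "</function_calls>", "</function>"]
          : List String).any (fun t => PySem.Chars.isIn t.toList
            (text.toList.drop (pvMaxIdx (pvOpenAt text.toList) text.toList.length).toNat))
          = true) := by
        simp only [List.any_eq_true, not_exists]
        rintro t ⟨ht, hin⟩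
        have h2 := hall t ht
        rw [PySem.Str.isIn_eq, htl] at h2
        exact h2 hin
      have hlt := (not_iff_not.mpr hany).mp this
      omega
    · intro hlt t ht
      rw [PySem.Str.isIn_eq, htl]
      by_contra hin
      have : (["</tool_call>", "</talk>", "</tool>", "</function_calls>", "</function>"]
          : List String).any (fun t => PySem.Chars.isIn t.toList
            (text.toList.drop (pvMaxIdx (pvOpenAt text.toList) text.toList.length).toNat))
          = true := List.any_eq_true.mpr ⟨t, ht, hin⟩
      have := hany.mp this
      omega
  · -- no open tag: both sides fall back to the ```tool_call fence logic
    have hMO : pvMaxIdx (pvOpenAt text.toList) text.toList.length = -1 := by omega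
    have hne : (pvMaxIdx (pvOpenAt text.toList) text.toList.length == -1) = true :=
      beq_iff_eq.mpr hMO
    have hseen : decide (0 ≤ pvMaxIdx (pvOpenAt text.toList) text.toList.length) = false :=
      decide_eq_false h0
    rw [hne, hseen]
    simp only [if_true, Bool.false_eq_true, if_false]
    rw [pv_rfind_fence_eq]
    have hMFle := pvMaxIdx_neg_one_le (pvFenceAt text.toList) text.toList.length
    by_cases hT : pvMaxIdx (pvFenceAt text.toList) text.toList.length = -1
    · rw [hT]; simp
    · have hT0 : 0 ≤ pvMaxIdx (pvFenceAt text.toList) text.toList.length := by omega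
      have hne2 : (pvMaxIdx (pvFenceAt text.toList) text.toList.length == -1) = false := by
        rw [beq_eq_false_iff_ne]; exact hT
      simp only [hne2, Bool.false_eq_true, if_false, hT]
      have htl2 : (PySem.Str.slice text
            (some (pvMaxIdx (pvFenceAt text.toList) text.toList.length + 12)) none).toList
          = text.toList.drop
              (pvMaxIdx (pvFenceAt text.toList) text.toList.length + 12).toNat := by
        rw [PySem.Str.toList_slice, PySem.Chars.slice_eq_listSlice,
          PySem.List.slice_from _ (by omega :
            (0 : Int) ≤ pvMaxIdx (pvFenceAt text.toList) text.toList.length + 12)]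
      have hAB : PySem.Chars.isIn ("```".toList)
            (text.toList.drop
              (pvMaxIdx (pvFenceAt text.toList) text.toList.length + 12).toNat)
          = decide (0 ≤ pvMaxIdx (pvFenceAt text.toList) text.toList.length ∧
              ∃ j < text.toList.length,
                pvMaxIdx (pvFenceAt text.toList) text.toList.length + 12 ≤ (j : Int) ∧
                  pvBtAt text.toList j = true) := by
        rw [Bool.eq_iff_iff, pv_isIn_drop_iff _ _ (by decide)]
        simp only [decide_eq_true_eq]
        constructor
        · rintro ⟨j, hle, hj, hp⟩
          exact ⟨hT0, j, hj, by omega, hp⟩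
        · rintro ⟨-, j, hj, hle, hp⟩
          exact ⟨j, by omega, hj, hp⟩
      rw [PySem.Str.isIn_eq, htl2, hAB]
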